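-- pv_equiv track=rewrite | github.com/ijuarezb/InterviewBit | 06_TreesDataStructure/hotel_reviews.py | solveIB1
-- ===== SOURCE A (Python) =====
-- def solveIB1(A, B):
--     goodWords = set(A.split("_"))
--     # Making it into a set is important, as searching through a set is faster
--     V = []
--     for index in range(len(B)):
--         countGoodWords = 0
--         for word in B[index].split("_"):
--             if word in goodWords:
--                 countGoodWords += 1
--         V.append([index, countGoodWords]) # store the index and the count
--     V.sort(key=lambda a:a[1], reverse=True) # use the count to sort (descending order)
--     return [x[0] for x in V] # return the sorted list of indexes
-- ===== SOURCE B (Python) =====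
-- def solveIB1(A, B):
--     good = set(A.split("_"))
--     counts = [sum(1 for w in r.split("_") if w in good) for r in B]
--     buckets = [[] for _ in range(max(counts, default=-1) + 1)]
--     for i, c in enumerate(counts):
--         buckets[c].append(i)
--     return [i for b in reversed(buckets) for i in b]
-- ===== Notes on version B (the rewrite author's own statement) =====
-- stated objective: alternative
-- what changed: Replaces A's comparison sort of (index, count) pairs by a counting/bucket sort: indices are appended into buckets[count] in increasing order and buckets are emitted from highest count down, reproducing the stable descending order without sorting.
import Mathlib
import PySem

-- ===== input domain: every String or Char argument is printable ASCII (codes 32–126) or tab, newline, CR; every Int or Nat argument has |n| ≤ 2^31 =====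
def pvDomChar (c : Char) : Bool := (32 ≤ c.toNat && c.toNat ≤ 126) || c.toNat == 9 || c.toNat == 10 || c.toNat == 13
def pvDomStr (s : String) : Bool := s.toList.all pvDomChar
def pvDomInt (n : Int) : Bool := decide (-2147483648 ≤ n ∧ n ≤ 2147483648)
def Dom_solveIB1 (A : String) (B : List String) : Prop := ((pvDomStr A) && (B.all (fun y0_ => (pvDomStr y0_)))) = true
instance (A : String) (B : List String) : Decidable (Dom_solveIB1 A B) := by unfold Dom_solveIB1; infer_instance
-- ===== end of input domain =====

-- B replaces A's comparison sort of (index, count) pairs by a counting/bucket sort: same return value, different algorithm.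

-- shared helper: s.split("_") (separator is the non-empty literal "_", so split? is always `some`)
def splitU (s : String) : List String := (PySem.Str.split? s "_").getD []

-- ===== PORT A =====
def solveIB1 (A : String) (B : List String) : List Int :=
  let goodWords := PySem.Set.ofList (splitU A)
  let V : List (Int × Int) :=
    (PySem.List.pyRange 0 (PySem.List.len B)).foldl
      (fun V index =>
        V ++ [(index,
          (splitU (PySem.List.pyGetD B index "")).foldl
            (fun c word => if goodWords.contains word then c + 1 else c) 0)]) []
  (PySem.List.sorted V (fun a => a.2) true).map (fun x => x.1)

-- ===== PORT B =====
def solveIB1_alt (A : String) (B : List String) : List Int :=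
  let good := PySem.Set.ofList (splitU A)
  let counts : List Int := B.map (fun r => ((splitU r).countP (fun w => good.contains w) : Int))
  -- buckets = [[] for _ in range(max(counts, default=-1) + 1)]
  let buckets : List (List Int) := List.replicate ((PySem.List.maxD counts (fun x => x) (-1)) + 1).toNat []
  -- for i, c in enumerate(counts): buckets[c].append(i)   (c is a count, hence ≥ 0: .toNat is exact)
  let filled := (PySem.List.enumerate counts).foldl
      (fun bk ic => bk.modify ic.2.toNat (fun b => b ++ [ic.1])) buckets
  filled.reverse.flatMap (fun b => b)

-- ===== PRECONDITION & SPEC =====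
def Spec_solveIB1 (A : String) (B : List String) (out : List Int) : Prop := out = solveIB1_alt A B
instance (A : String) (B : List String) (out : List Int) : Decidable (Spec_solveIB1 A B out) := by unfold Spec_solveIB1; infer_instance

-- ===== CLAIM (what is proved, stated in full; the proofs are below) =====
def Claim_equal_solveIB1 : Prop := ∀ (A : String) (B : List String), Dom_solveIB1 A B → Spec_solveIB1 A B (solveIB1 A B)

-- ===== LEMMAS AND PROOFS =====

-- the bucket view of a pair list: buckets for counts m-1, m-2, …, 0, concatenated
def bkts (m : Nat) (V : List (Int × Int)) : List (Int × Int) :=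
  ((List.range m).reverse).flatMap (fun (c : Nat) => V.filter (fun p => p.2 == (c : Int)))

-- inserting x between a prefix it does not go before and a suffix it goes before
theorem insertBy_split {α : Type} (bef : α → α → Bool) (x : α) (hi lo : List α)
    (h1 : ∀ y ∈ hi, bef x y = false) (h2 : ∀ y ∈ lo, bef x y = true) :
    PySem.List.insertBy bef x (hi ++ lo) = hi ++ x :: lo := by
  induction hi with
  | nil =>
    cases lo with
    | nil => simp [PySem.List.insertBy]
    | cons z zs => simp [PySem.List.insertBy, h2 z (by simp)]
  | cons y ys ih =>
    simp only [List.cons_append, PySem.List.insertBy, h1 y (by simp)]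
    simp only [Bool.false_eq_true, if_false, List.cons.injEq, true_and]
    exact ih (fun y hy => h1 y (by simp [hy]))

theorem insert_into_bkts (m : Nat) (P : List (Int × Int)) (x : Int × Int)
    (hx0 : 0 ≤ x.2) (hxm : x.2 < (m : Int)) :
    PySem.List.insertBy (fun a b => decide (b.2 < a.2)) x (bkts m P) = bkts m (P ++ [x]) := by
  have hc : (x.2.toNat : Int) = x.2 := Int.toNat_of_nonneg hx0
  set c := x.2.toNat with hcdef
  have hcm : c < m := by omega
  have hsplit : (List.range m).reverse
      = ((List.range' (c+1) (m-c-1)).reverse ++ [c]) ++ (List.range' 0 c).reverse := by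
    have h1 : List.range' 0 c ++ List.range' (0+c) (m-c) = List.range' 0 (c+(m-c)) :=
      List.range'_append_1
    have h2 : List.range' c (m-c) = c :: List.range' (c+1) (m-c-1) := by
      obtain ⟨k, hk⟩ : ∃ k, m - c = k + 1 := ⟨m-c-1, by omega⟩
      have hk' : m - c - 1 = k := by omega
      rw [hk, List.range'_succ]
      simp
    rw [List.range_eq_range']
    have h3 : (0:Nat)+c = c := by omega
    have h4 : c+(m-c) = m := by omega
    rw [← h4, ← h1, h3, h2]
    have h5 : c + (m - c) - c - 1 = m - c - 1 := by omega
    rw [h5]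
    simp [List.reverse_append]
  unfold bkts
  rw [hsplit]
  simp only [List.flatMap_append, List.flatMap_cons, List.flatMap_nil, List.append_nil]
  have hhi : ∀ y ∈ (List.range' (c+1) (m-c-1)).reverse.flatMap
      (fun (c' : Nat) => P.filter (fun p => p.2 == (c' : Int))) ++ P.filter (fun p => p.2 == (c : Int)),
      (decide (y.2 < x.2)) = false := by
    intro y hy
    rcases List.mem_append.1 hy with hy | hy
    · obtain ⟨c', hc', hyf⟩ := List.mem_flatMap.1 hy
      have := (List.mem_filter.1 hyf).2
      have hy2 : y.2 = (c' : Int) := by simpa using this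
      have : c + 1 ≤ c' := (List.mem_range'_1.1 (List.mem_reverse.1 hc')).1
      simp [hy2]; omega
    · have := (List.mem_filter.1 hy).2
      have hy2 : y.2 = (c : Int) := by simpa using this
      simp [hy2, hc]
  have hlo : ∀ y ∈ (List.range' 0 c).reverse.flatMap
      (fun (c' : Nat) => P.filter (fun p => p.2 == (c' : Int))), (decide (y.2 < x.2)) = true := by
    intro y hy
    obtain ⟨c', hc', hyf⟩ := List.mem_flatMap.1 hy
    have := (List.mem_filter.1 hyf).2
    have hy2 : y.2 = (c' : Int) := by simpa using this
    have : c' < 0 + c := (List.mem_range'_1.1 (List.mem_reverse.1 hc')).2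
    simp [hy2]; omega
  have hins := insertBy_split (fun a b => decide (b.2 < a.2)) x
    ((List.range' (c+1) (m-c-1)).reverse.flatMap
      (fun (c' : Nat) => P.filter (fun p => p.2 == (c' : Int))) ++ P.filter (fun p => p.2 == (c : Int)))
    ((List.range' 0 c).reverse.flatMap (fun (c' : Nat) => P.filter (fun p => p.2 == (c' : Int))))
    hhi hlo
  rw [List.append_assoc] at hins ⊢
  rw [hins]
  -- now rewrite the (P ++ [x]) filters
  have hfhi : (List.range' (c+1) (m-c-1)).reverse.flatMap
      (fun (c' : Nat) => (P ++ [x]).filter (fun p => p.2 == (c' : Int)))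
      = (List.range' (c+1) (m-c-1)).reverse.flatMap
        (fun (c' : Nat) => P.filter (fun p => p.2 == (c' : Int))) := by
    apply List.flatMap_congr
    intro c' hc'
    have : c + 1 ≤ c' := (List.mem_range'_1.1 (List.mem_reverse.1 hc')).1
    rw [List.filter_append]
    have : (x.2 == (c' : Int)) = false := by simp; omega
    simp [List.filter, this]
  have hflo : (List.range' 0 c).reverse.flatMap
      (fun (c' : Nat) => (P ++ [x]).filter (fun p => p.2 == (c' : Int)))
      = (List.range' 0 c).reverse.flatMap
        (fun (c' : Nat) => P.filter (fun p => p.2 == (c' : Int))) := by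
    apply List.flatMap_congr
    intro c' hc'
    have : c' < 0 + c := (List.mem_range'_1.1 (List.mem_reverse.1 hc')).2
    rw [List.filter_append]
    have : (x.2 == (c' : Int)) = false := by simp; omega
    simp [List.filter, this]
  have hfc : (P ++ [x]).filter (fun p => p.2 == (c : Int))
      = P.filter (fun p => p.2 == (c : Int)) ++ [x] := by
    rw [List.filter_append]
    have : (x.2 == (c : Int)) = true := by simp [hc]
    simp [List.filter, this]
  rw [hfhi, hflo, hfc]
  simp

theorem sorted_rev_eq_bkts (m : Nat) (V : List (Int × Int))
    (h : ∀ p ∈ V, 0 ≤ p.2 ∧ p.2 < (m : Int)) :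
    PySem.List.sorted V (fun a => a.2) true = bkts m V := by
  rw [PySem.List.sorted_rev_eq_foldl_insertBy]
  have main : ∀ (xs P : List (Int × Int)), (∀ p ∈ xs, 0 ≤ p.2 ∧ p.2 < (m : Int)) →
      xs.foldl (fun acc x => PySem.List.insertBy (fun a b => decide (b.2 < a.2)) x acc) (bkts m P)
        = bkts m (P ++ xs) := by
    intro xs
    induction xs with
    | nil => intro P _; simp
    | cons x t ih =>
      intro P hx
      simp only [List.foldl_cons]
      rw [insert_into_bkts m P x (hx x (by simp)).1 (hx x (by simp)).2,
        ih (P ++ [x]) (fun p hp => hx p (by simp [hp]))]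
      simp
  have hmain := main V [] h
  have hnil : bkts m [] = [] := by simp [bkts, List.flatMap_eq_nil_iff]
  rw [hnil] at hmain
  simpa using hmain

theorem fill_buckets (ps : List (Int × Int)) (bks : List (List Int))
    (h : ∀ p ∈ ps, 0 ≤ p.2 ∧ p.2 < (bks.length : Int)) :
    ps.foldl (fun bk ic => bk.modify ic.2.toNat (fun b => b ++ [ic.1])) bks
      = (List.range bks.length).map
          (fun c => bks.getD c [] ++ (ps.filter (fun p => p.2 == (c : Int))).map (fun p => p.1)) := by
  induction ps generalizing bks with
  | nil =>
    simp only [List.foldl_nil, List.filter_nil, List.map_nil, List.append_nil]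
    symm
    apply List.ext_getElem
    · simp
    · intro i h1 h2
      simp [List.getD_eq_getElem?_getD, h2]
  | cons p t ih =>
    obtain ⟨hp0, hpm⟩ := h p (by simp)
    have hlen : (bks.modify p.2.toNat (fun b => b ++ [p.1])).length = bks.length :=
      List.length_modify _ _ _
    simp only [List.foldl_cons]
    rw [ih (bks.modify p.2.toNat (fun b => b ++ [p.1]))
      (by intro q hq; have := h q (by simp [hq]); simpa [hlen] using this), hlen]
    apply List.map_congr_left
    intro c hcmem
    have hcc : c < bks.length := List.mem_range.1 hcmem
    have hget : (bks.modify p.2.toNat (fun b => b ++ [p.1])).getD c []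
        = if p.2.toNat = c then bks.getD c [] ++ [p.1] else bks.getD c [] := by
      have h2 : c < (bks.modify p.2.toNat (fun b => b ++ [p.1])).length := by
        simpa [hlen] using hcc
      rw [List.getD_eq_getElem _ _ h2, List.getElem_modify, List.getD_eq_getElem _ _ hcc]
    by_cases heq : p.2.toNat = c
    · have hbeq : (p.2 == (c : Int)) = true := by
        simp only [beq_iff_eq]; omega
      rw [hget]
      simp [hbeq, heq]
    · have hbeq : (p.2 == (c : Int)) = false := by
        simp only [beq_eq_false_iff_ne, ne_eq]; omega
      rw [hget]
      simp [hbeq, heq]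

theorem enum_map_range {α β : Type} (l : List α) (g : α → β) (d : α) :
    PySem.List.enumerate (l.map g) 0 = (List.range l.length).map (fun (k : Nat) => ((k : Int), g (l.getD k d))) := by
  apply List.ext_getElem
  · simp [PySem.List.length_enumerate]
  · intro i h1 h2
    have hi : i < l.length := by simpa [PySem.List.length_enumerate] using h1
    rw [PySem.List.getElem_enumerate]
    simp [hi]

-- the counts list both programs compute, and the number of buckets B allocates
def cntsOf (A : String) (B : List String) : List Int :=
  B.map (fun r => ((splitU r).countP (fun w => (PySem.Set.ofList (splitU A)).contains w) : Int))

def nbOf (A : String) (B : List String) : Nat :=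
  ((PySem.List.maxD (cntsOf A B) (fun x => x) (-1)) + 1).toNat

theorem cnts_nonneg (A : String) (B : List String) : ∀ v ∈ cntsOf A B, 0 ≤ v := by
  intro v hv
  obtain ⟨r, _, rfl⟩ := List.mem_map.1 hv
  positivity

theorem cnts_lt_nb (A : String) (B : List String) : ∀ v ∈ cntsOf A B, v < (nbOf A B : Int) := by
  intro v hv
  have hne : cntsOf A B ≠ [] := by intro h; rw [h] at hv; simp at hv
  have hmax : v ≤ PySem.List.maxD (cntsOf A B) (fun x => x) (-1) :=
    PySem.List.le_key_maxD (cntsOf A B) (fun x => x) (-1) hne v hv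
  have h0 : 0 ≤ v := cnts_nonneg A B v hv
  unfold nbOf
  rw [Int.toNat_of_nonneg (by omega)]
  omega

theorem bounds_enum (A : String) (B : List String) :
    ∀ p ∈ PySem.List.enumerate (cntsOf A B) 0, 0 ≤ p.2 ∧ p.2 < (nbOf A B : Int) := by
  intro p hp
  obtain ⟨k, hk, rfl⟩ := (PySem.List.mem_enumerate_iff _ _ _).1 hp
  have hmem : (cntsOf A B)[k] ∈ cntsOf A B := List.getElem_mem hk
  exact ⟨cnts_nonneg A B _ hmem, cnts_lt_nb A B _ hmem⟩

theorem portA_eq (A : String) (B : List String) :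
    solveIB1 A B = (bkts (nbOf A B) (PySem.List.enumerate (cntsOf A B) 0)).map (fun p => p.1) := by
  simp only [solveIB1]
  have hV : (PySem.List.pyRange 0 (PySem.List.len B)).foldl
      (fun V index =>
        V ++ [(index,
          (splitU (PySem.List.pyGetD B index "")).foldl
            (fun c word => if (PySem.Set.ofList (splitU A)).contains word then c + 1 else c) 0)]) []
      = PySem.List.enumerate (cntsOf A B) 0 := by
    rw [PySem.List.len_eq, PySem.List.pyRange_zero_natCast, List.foldl_map,
      PySem.List.foldl_append_singleton_eq_map]
    unfold cntsOf
    rw [enum_map_range B _ ""]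
    simp only [List.nil_append]
    apply List.map_congr_left
    intro k hk
    rw [PySem.List.pyGetD_natCast, PySem.List.foldl_count_if]
    simp only [Int.zero_add]
  rw [hV, sorted_rev_eq_bkts (nbOf A B) _ (bounds_enum A B)]

theorem portB_eq (A : String) (B : List String) :
    solveIB1_alt A B = (bkts (nbOf A B) (PySem.List.enumerate (cntsOf A B) 0)).map (fun p => p.1) := by
  unfold solveIB1_alt
  show (((PySem.List.enumerate (cntsOf A B) 0).foldl
      (fun bk ic => bk.modify ic.2.toNat (fun b => b ++ [ic.1]))
      (List.replicate (nbOf A B) [])).reverse).flatMap (fun b => b) = _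
  rw [fill_buckets _ _ (by simpa [List.length_replicate] using bounds_enum A B)]
  simp only [List.length_replicate]
  have hrep : ∀ c ∈ List.range (nbOf A B), (List.replicate (nbOf A B) ([] : List Int)).getD c []
      ++ ((PySem.List.enumerate (cntsOf A B) 0).filter (fun p => p.2 == (c : Int))).map (fun p => p.1)
      = ((PySem.List.enumerate (cntsOf A B) 0).filter (fun p => p.2 == (c : Int))).map (fun p => p.1) := by
    intro c hc
    have : c < nbOf A B := List.mem_range.1 hc
    simp [List.getD_eq_getElem?_getD, this]
  rw [List.map_congr_left hrep]
  rw [← List.map_reverse, List.flatMap_id']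
  unfold bkts
  simp [List.flatMap_def, List.map_map]
  rfl

-- ===== VERDICT (by name: the statement is the Claim_ definition above) =====
theorem solveIB1_spec : Claim_equal_solveIB1 := by
  intro A B _
  unfold Spec_solveIB1
  rw [portA_eq, portB_eq]
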